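-- pv_equiv track=rewrite | github.com/mayank64ce/AIDE-FHE | aide/backend/backend_openrouter.py | _is_reasoning_model
-- ===== SOURCE A (Python) =====
-- REASONING_MODELS = [
--     "deepseek/deepseek-r1",
--     "deepseek/deepseek-r1-0528",
--     "deepseek/deepseek-r1-distill-llama-70b",
--     "qwen/qwq-32b",
--     "qwen/qwq-32b-preview",
-- ]
--
-- def _is_reasoning_model(model: str) -> bool:
--     """Check if model supports reasoning tokens."""
--     model_lower = model.lower()
--     for pattern in REASONING_MODELS:
--         if pattern in model_lower:
--             return True
--     # Also check for common reasoning model patterns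
--     if "deepseek-r1" in model_lower or "qwq" in model_lower:
--         return True
--     return False
-- ===== SOURCE B (Python) =====
-- def _is_reasoning_model(model: str) -> bool:
--     """Check if model supports reasoning tokens."""
--     model_lower = model.lower()
--     return "deepseek-r1" in model_lower or "qwq" in model_lower
-- ===== Notes on version B (the rewrite author's own statement) =====
-- stated objective: simpler
-- what changed: Dropped the REASONING_MODELS table and its loop entirely: every listed pattern contains 'deepseek-r1' or 'qwq' as a substring, so the two fallback substring checks alone decide the result.
import Mathlib
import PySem

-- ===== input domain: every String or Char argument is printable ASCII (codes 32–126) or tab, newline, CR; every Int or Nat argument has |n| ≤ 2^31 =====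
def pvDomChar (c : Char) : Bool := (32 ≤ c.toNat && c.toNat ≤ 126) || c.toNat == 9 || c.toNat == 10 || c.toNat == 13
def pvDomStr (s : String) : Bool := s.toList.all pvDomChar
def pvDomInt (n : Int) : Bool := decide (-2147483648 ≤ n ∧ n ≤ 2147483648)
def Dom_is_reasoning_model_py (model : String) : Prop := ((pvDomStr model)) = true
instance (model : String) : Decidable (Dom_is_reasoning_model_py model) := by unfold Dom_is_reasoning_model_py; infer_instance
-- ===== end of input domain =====

-- B drops A's REASONING_MODELS table and loop: every listed pattern contains
-- "deepseek-r1" or "qwq", so the two fallback substring checks alone decide the result.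

-- ===== PORT A =====
def reasoningModels : List String :=
  ["deepseek/deepseek-r1",
   "deepseek/deepseek-r1-0528",
   "deepseek/deepseek-r1-distill-llama-70b",
   "qwen/qwq-32b",
   "qwen/qwq-32b-preview"]

-- the 'for pattern in REASONING_MODELS' loop with its early return, then the fallback checks
def aPatternLoop (model_lower : String) : List String → Bool
  | [] =>
      if PySem.Str.isIn "deepseek-r1" model_lower || PySem.Str.isIn "qwq" model_lower then true
      else false
  | pattern :: rest =>
      if PySem.Str.isIn pattern model_lower then true else aPatternLoop model_lower rest

def is_reasoning_model_py (model : String) : Bool :=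
  aPatternLoop (PySem.Str.lower model) reasoningModels

-- ===== PORT B =====
def is_reasoning_model_py_alt (model : String) : Bool :=
  let model_lower := PySem.Str.lower model
  PySem.Str.isIn "deepseek-r1" model_lower || PySem.Str.isIn "qwq" model_lower

-- ===== PRECONDITION & SPEC =====
def Spec_is_reasoning_model_py (model : String) (out : Bool) : Prop := out = is_reasoning_model_py_alt model
instance (model : String) (out : Bool) : Decidable (Spec_is_reasoning_model_py model out) := by unfold Spec_is_reasoning_model_py; infer_instance

-- ===== CLAIM (what is proved, stated in full; the proofs are below) =====
def Claim_equal_is_reasoning_model_py : Prop := ∀ (model : String), Dom_is_reasoning_model_py model → Spec_is_reasoning_model_py model (is_reasoning_model_py model)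

-- ===== LEMMAS AND PROOFS =====

-- substring-of-a-pattern transitivity: if sub is inside p and p is inside m, sub is inside m
theorem pv_isIn_trans (sub p m : List Char) (h1 : sub <:+: p)
    (h2 : PySem.Chars.isIn p m = true) : PySem.Chars.isIn sub m = true := by
  rw [PySem.Chars.isIn_iff_infix] at h2 ⊢
  exact h1.trans h2

-- ===== VERDICT (by name: the statement is the Claim_ definition above) =====
theorem is_reasoning_model_py_spec : Claim_equal_is_reasoning_model_py := by
  intro model _
  unfold Spec_is_reasoning_model_py is_reasoning_model_py is_reasoning_model_py_alt reasoningModels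
  set m := PySem.Str.lower model with hm
  simp only [aPatternLoop]
  split_ifs with h1 h2 h3 h4 h5 <;> simp_all
  · exact Or.inl (pv_isIn_trans _ _ _ (by decide) h1)
  · exact Or.inl (pv_isIn_trans _ _ _ (by decide) h2)
  · exact Or.inl (pv_isIn_trans _ _ _ (by decide) h3)
  · exact Or.inr (pv_isIn_trans _ _ _ (by decide) h4)
  · exact Or.inr (pv_isIn_trans _ _ _ (by decide) h5)
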